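-- pv_equiv track=rewrite | github.com/dreww5211/graphing | pages/Integration graphing.py | numpyParser
-- ===== SOURCE A (Python) =====
-- def numpyParser(expre):
--     if 'log' in expre:
--         exprList = list(expre)
--         for i,char in enumerate(exprList):
--             if char == 'g':
--                 for k in range(i+2, len(exprList)):
--                     if exprList[k] == ')':
--                         exprList[k] = ", 10" + exprList[k]
--                         break
--         expre = ''.join(str(x) for x in exprList)
--
--
--     if 'ln' in expre:
--         expre = expre.replace('ln', 'log')
--
--
--     return expre
-- ===== SOURCE B (Python) =====
-- def numpyParser(expre):
--     if 'log' in expre: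
--         gs = [i for i, c in enumerate(expre) if c == 'g']
--         rs = [i for i, c in enumerate(expre) if c == ')']
--         matched = []
--         gi = 0
--         for r in rs:
--             if gi < len(gs) and gs[gi] + 2 <= r:
--                 matched.append(r)
--                 gi += 1
--         expre = ''.join(', 10)' if i in matched else c for i, c in enumerate(expre))
--     if 'ln' in expre:
--         expre = expre.replace('ln', 'log')
--     return expre
-- ===== Notes on version B (the rewrite author's own statement) =====
-- stated objective: alternative
-- what changed: A mutates a char-cell list, scanning forward from each 'g' for the first unclaimed closing paren; B extracts the 'g' and ')' position lists once and computes the matched parens with a single two-pointer pass, then rebuilds the string in one comprehension.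
import Mathlib
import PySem

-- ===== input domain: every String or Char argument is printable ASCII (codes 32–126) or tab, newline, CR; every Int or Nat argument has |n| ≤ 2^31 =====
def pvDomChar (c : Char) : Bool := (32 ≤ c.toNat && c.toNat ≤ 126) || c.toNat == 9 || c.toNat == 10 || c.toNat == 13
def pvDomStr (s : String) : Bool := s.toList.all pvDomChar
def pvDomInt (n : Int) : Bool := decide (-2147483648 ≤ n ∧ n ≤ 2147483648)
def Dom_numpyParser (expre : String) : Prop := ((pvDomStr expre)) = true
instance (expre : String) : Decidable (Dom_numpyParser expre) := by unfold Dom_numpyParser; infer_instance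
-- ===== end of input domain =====

-- B replaces A's cell-mutating nested forward scans by a single two-pointer match over the
-- extracted 'g'- and ')'-position lists (objective: alternative; a different algorithm, same results).

-- ===== PORT A =====
-- inner loop: 'for k in range(i+2, len(exprList)): if exprList[k] == ")": mutate; break'
-- (list indices are always in range here, so List.getD/List.set are exact)
def npAInner (l : List (List Char)) (k n : Nat) : List (List Char) :=
  if _h : k < n then
    if l.getD k [] = [')'] then l.set k ([',', ' ', '1', '0'] ++ l.getD k [])
    else npAInner l (k + 1) n
  else l
termination_by n - k

-- outer loop: 'for i, char in enumerate(exprList): if char == "g": <inner>'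
def npAOuter (l : List (List Char)) (i n : Nat) : List (List Char) :=
  if _h : i < n then
    npAOuter (if l.getD i [] = ['g'] then npAInner l (i + 2) n else l) (i + 1) n
  else l
termination_by n - i

def numpyParser (expre : String) : String :=
  let expre1 :=
    if PySem.Str.isIn "log" expre then
      let exprList := expre.toList.map (fun c => [c])
      String.ofList (PySem.Chars.join [] (npAOuter exprList 0 exprList.length))
    else expre
  if PySem.Str.isIn "ln" expre1 then PySem.Str.replace expre1 "ln" "log" else expre1

-- ===== PORT B =====
-- one step of Source B's 'for r in rs' loop over (matched, gi); gi is a counter starting at 0,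
-- only ever incremented, so a Nat is exact; the gs[gi] lookup is guarded by gi < len(gs)
def npBMatch (gs : List Int) (st : List Int × Nat) (r : Int) : List Int × Nat :=
  if st.2 < gs.length ∧ gs.getD st.2 0 + 2 ≤ r then (st.1 ++ [r], st.2 + 1) else st

def numpyParser_alt (expre : String) : String :=
  let expre1 :=
    if PySem.Str.isIn "log" expre then
      let cs := expre.toList
      let gs := (PySem.List.enumerate cs).filterMap (fun p => if p.2 = 'g' then some p.1 else none)
      let rs := (PySem.List.enumerate cs).filterMap (fun p => if p.2 = ')' then some p.1 else none)
      let matched := (rs.foldl (npBMatch gs) ([], 0)).1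
      String.ofList (PySem.Chars.join []
        ((PySem.List.enumerate cs).map (fun p => if p.1 ∈ matched then [',', ' ', '1', '0', ')'] else [p.2])))
    else expre
  if PySem.Str.isIn "ln" expre1 then PySem.Str.replace expre1 "ln" "log" else expre1

-- ===== PRECONDITION & SPEC =====
def Spec_numpyParser (expre : String) (out : String) : Prop := out = numpyParser_alt expre
instance (expre : String) (out : String) : Decidable (Spec_numpyParser expre out) := by unfold Spec_numpyParser; infer_instance

-- ===== CLAIM (what is proved, stated in full; the proofs are below) =====
def Claim_equal_numpyParser : Prop := ∀ (expre : String), Dom_numpyParser expre → Spec_numpyParser expre (numpyParser expre)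

-- ===== LEMMAS AND PROOFS =====

-- the ')' positions and 'g' positions of the original character list
def rsN (cs : List Char) : List Nat :=
  (List.range cs.length).filter (fun j => decide (cs.getD j ' ' = ')'))
def gsN (cs : List Char) : List Nat :=
  (List.range cs.length).filter (fun j => decide (cs.getD j ' ' = 'g'))

-- the cell list after the claims in m have been applied
def pieces (cs : List Char) (m : List Nat) : List (List Char) :=
  (List.range cs.length).map (fun k => if k ∈ m then [',', ' ', '1', '0', ')'] else [cs.getD k ' '])

-- two-pointer greedy matching (the algorithm of B, on Nat position lists)
def tp : List Nat → List Nat → List Nat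
  | _, [] => []
  | [], _ :: _ => []
  | g :: gs, r :: rs => if g + 2 ≤ r then r :: tp gs rs else tp (g :: gs) rs
termination_by gs rs => gs.length + rs.length

-- sequential greedy matching (the algorithm of A: each g claims the first unclaimed ')')
def greedy : List Nat → List Nat → List Nat
  | [], _ => []
  | g :: gs, rs =>
      match rs.find? (fun r => decide (g + 2 ≤ r)) with
      | some j => j :: greedy gs (rs.erase j)
      | none => greedy gs rs

-- A's outer loop at the level of claimed-position lists
def seqF (cs : List Char) : List Nat → List Nat → List Nat
  | [], m => m
  | g :: gs, m =>
      seqF cs gs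
        (match ((rsN cs).filter (fun r => decide (r ∉ m))).find? (fun r => decide (g + 2 ≤ r)) with
         | some j => j :: m
         | none => m)

def gsuffix (cs : List Char) (i : Nat) : List Nat :=
  (List.range' i (cs.length - i)).filter (fun j => decide (cs.getD j ' ' = 'g'))


-- find? helpers on Nat lists
theorem find?_ge_shift (l : List Nat) (k : Nat) (hk : k ∉ l) :
    l.find? (fun r => decide (k ≤ r)) = l.find? (fun r => decide (k + 1 ≤ r)) := by
  induction l with
  | nil => rfl
  | cons r l ih =>
    simp only [List.mem_cons, not_or] at hk
    have h1 : (decide (k ≤ r)) = (decide (k + 1 ≤ r)) := by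
      rcases hk with ⟨h, _⟩; simp only [decide_eq_decide]; omega
    simp only [List.find?_cons, h1]
    cases h2 : decide (k + 1 ≤ r) with
    | true => rfl
    | false => exact ih hk.2

theorem find?_ge_self (l : List Nat) (k : Nat) (hp : l.Pairwise (· < ·)) (hk : k ∈ l) :
    l.find? (fun r => decide (k ≤ r)) = some k := by
  induction l with
  | nil => simp at hk
  | cons r l ih =>
    rcases List.mem_cons.1 hk with h | h
    · subst h; simp
    · have hr : r < k := (List.pairwise_cons.1 hp).1 k h
      have : (decide (k ≤ r)) = false := by simp; omega
      simp only [List.find?_cons, this]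
      exact ih (List.pairwise_cons.1 hp).2 h

theorem rsN_pairwise (cs : List Char) : (rsN cs).Pairwise (· < ·) :=
  (List.pairwise_lt_range).filter _

theorem gsN_pairwise (cs : List Char) : (gsN cs).Pairwise (· < ·) :=
  (List.pairwise_lt_range).filter _

theorem rsN_nodup (cs : List Char) : (rsN cs).Nodup :=
  (rsN_pairwise cs).imp (fun h => Nat.ne_of_lt h)

theorem mem_rsN (cs : List Char) (k : Nat) :
    k ∈ rsN cs ↔ k < cs.length ∧ cs.getD k ' ' = ')' := by
  simp [rsN, List.mem_filter, List.mem_range]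

theorem pieces_getD (cs : List Char) (m : List Nat) (k : Nat) (hk : k < cs.length) :
    (pieces cs m).getD k [] = if k ∈ m then [',', ' ', '1', '0', ')'] else [cs.getD k ' '] := by
  simp [pieces, List.getD_eq_getElem?_getD, hk]

theorem pieces_set (cs : List Char) (m : List Nat) (k : Nat) (_hk : k < cs.length) :
    (pieces cs m).set k [',', ' ', '1', '0', ')'] = pieces cs (k :: m) := by
  apply List.ext_getElem
  · simp [pieces]
  · intro j h1 h2
    simp only [pieces, List.length_map, List.length_range] at h1 h2
    simp only [pieces, List.getElem_set, List.getElem_map, List.getElem_range]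
    by_cases hj : k = j
    · subst hj; simp
    · have hj2 : ¬ j = k := fun h => hj h.symm
      simp [hj, hj2, List.mem_cons]

theorem pieces_congr (cs : List Char) (m1 m2 : List Nat) (h : ∀ x, x ∈ m1 ↔ x ∈ m2) :
    pieces cs m1 = pieces cs m2 := by
  simp only [pieces]
  apply List.map_congr_left
  intro k _
  by_cases hk : k ∈ m1
  · simp [hk, (h k).1 hk]
  · simp [hk, show k ∉ m2 from fun hx => hk ((h k).2 hx)]

theorem pieces_nil (cs : List Char) : pieces cs [] = cs.map (fun c => [c]) := by
  apply List.ext_getElem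
  · simp [pieces]
  · intro j h1 h2
    simp only [pieces, List.length_map, List.length_range] at h1 h2
    simp [pieces, h2]

-- A's inner scan = find the first unclaimed ')' at position ≥ k
theorem innerA (cs : List Char) (m : List Nat) : ∀ (d k : Nat), cs.length - k = d →
    npAInner (pieces cs m) k cs.length =
      match ((rsN cs).filter (fun r => decide (r ∉ m))).find? (fun r => decide (k ≤ r)) with
      | some j => pieces cs (j :: m)
      | none => pieces cs m := by
  intro d
  induction d with
  | zero =>
    intro k hk
    have hkn : ¬ k < cs.length := by omega
    have hnone : ((rsN cs).filter (fun r => decide (r ∉ m))).find? (fun r => decide (k ≤ r)) = none := by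
      rw [List.find?_eq_none]
      intro r hr
      have := (mem_rsN cs r).1 (List.mem_of_mem_filter hr)
      simp only [decide_eq_true_eq]
      omega
    rw [npAInner, dif_neg hkn, hnone]
  | succ d ih =>
    intro k hk
    have hkn : k < cs.length := by omega
    rw [npAInner, dif_pos hkn, pieces_getD cs m k hkn]
    by_cases hm : k ∈ m
    · have hne : ([',', ' ', '1', '0', ')'] : List Char) ≠ [')'] := by decide
      rw [if_pos hm, if_neg hne]
      have hnotk : k ∉ (rsN cs).filter (fun r => decide (r ∉ m)) := by
        intro hkF
        have := List.mem_filter.1 hkF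
        simp only [decide_eq_true_eq] at this
        exact this.2 hm
      rw [ih (k + 1) (by omega), ← find?_ge_shift _ k hnotk]
    · rw [if_neg hm]
      by_cases hc : cs.getD k ' ' = ')'
      · have hceq : ([cs.getD k ' '] : List Char) = [')'] := by rw [hc]
        rw [if_pos hceq, hceq]
        have hkF : k ∈ (rsN cs).filter (fun r => decide (r ∉ m)) :=
          List.mem_filter.2 ⟨(mem_rsN cs k).2 ⟨hkn, hc⟩, by simp [hm]⟩
        have hpair : ((rsN cs).filter (fun r => decide (r ∉ m))).Pairwise (· < ·) :=
          (rsN_pairwise cs).filter _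
        rw [find?_ge_self _ k hpair hkF]
        exact pieces_set cs m k hkn
      · have hcne : ([cs.getD k ' '] : List Char) ≠ [')'] := fun hx => hc (List.singleton_inj.mp hx)
        rw [if_neg hcne]
        have hnotk : k ∉ (rsN cs).filter (fun r => decide (r ∉ m)) := by
          intro hkF
          exact hc ((mem_rsN cs k).1 (List.mem_of_mem_filter hkF)).2
        rw [ih (k + 1) (by omega), ← find?_ge_shift _ k hnotk]

-- A's outer loop = seqF over the remaining g positions
theorem outerA (cs : List Char) : ∀ (d i : Nat) (m : List Nat), cs.length - i = d →
    (∀ x ∈ m, cs.getD x ' ' = ')') →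
    npAOuter (pieces cs m) i cs.length = pieces cs (seqF cs (gsuffix cs i) m) := by
  intro d
  induction d with
  | zero =>
    intro i m hd _hm
    have hin : ¬ i < cs.length := by omega
    have hsuf : gsuffix cs i = [] := by
      unfold gsuffix
      rw [show cs.length - i = 0 from by omega]
      rfl
    rw [npAOuter, dif_neg hin, hsuf]
    rfl
  | succ d ih =>
    intro i m hd hm
    have hin : i < cs.length := by omega
    have hsplit : List.range' i (cs.length - i) = i :: List.range' (i + 1) (cs.length - (i + 1)) := by
      rw [show cs.length - i = (cs.length - (i + 1)) + 1 from by omega, List.range'_succ]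
    rw [npAOuter, dif_pos hin, pieces_getD cs m i hin]
    by_cases hg : cs.getD i ' ' = 'g'
    · have him : i ∉ m := fun hx => by rw [hm i hx] at hg; exact absurd hg (by decide)
      rw [if_pos (show (if i ∈ m then ([',', ' ', '1', '0', ')'] : List Char) else [cs.getD i ' ']) = ['g'] from by
        rw [if_neg him, hg])]
      rw [innerA cs m (cs.length - (i + 2)) (i + 2) rfl]
      have hsuf : gsuffix cs i = i :: gsuffix cs (i + 1) := by
        unfold gsuffix
        rw [hsplit, List.filter_cons, if_pos (decide_eq_true hg)]
      rw [hsuf]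
      rw [show seqF cs (i :: gsuffix cs (i + 1)) m =
            seqF cs (gsuffix cs (i + 1))
              (match ((rsN cs).filter (fun r => decide (r ∉ m))).find? (fun r => decide (i + 2 ≤ r)) with
               | some j => j :: m
               | none => m) from rfl]
      cases hf : ((rsN cs).filter (fun r => decide (r ∉ m))).find? (fun r => decide (i + 2 ≤ r)) with
      | none => exact ih (i + 1) m (by omega) hm
      | some j =>
        have hj : cs.getD j ' ' = ')' :=
          ((mem_rsN cs j).1 (List.mem_of_mem_filter (List.mem_of_find?_eq_some hf))).2
        refine ih (i + 1) (j :: m) (by omega) ?_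
        intro x hx
        rcases List.mem_cons.1 hx with h | h
        · subst h; exact hj
        · exact hm x h
    · rw [if_neg (show ¬ (if i ∈ m then ([',', ' ', '1', '0', ')'] : List Char) else [cs.getD i ' ']) = ['g'] from by
        by_cases him : i ∈ m
        · rw [if_pos him]; decide
        · rw [if_neg him]; exact fun hx => hg (List.singleton_inj.mp hx))]
      have hsuf : gsuffix cs i = gsuffix cs (i + 1) := by
        unfold gsuffix
        rw [hsplit, List.filter_cons, if_neg (fun hx => hg (of_decide_eq_true hx))]
      rw [hsuf]
      exact ih (i + 1) m (by omega) hm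

-- seqF membership = greedy membership
theorem seqF_mem (cs : List Char) (gs : List Nat) : ∀ (m : List Nat) (x : Nat),
    x ∈ seqF cs gs m ↔ x ∈ m ∨ x ∈ greedy gs ((rsN cs).filter (fun r => decide (r ∉ m))) := by
  induction gs with
  | nil => intro m x; simp [seqF, greedy]
  | cons g gs ih =>
    intro m x
    simp only [seqF, greedy]
    cases hf : ((rsN cs).filter (fun r => decide (r ∉ m))).find? (fun r => decide (g + 2 ≤ r)) with
    | none => exact ih m x
    | some j =>
      have hnd : ((rsN cs).filter (fun r => decide (r ∉ m))).Nodup := (rsN_nodup cs).filter _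
      have hFF : (rsN cs).filter (fun r => decide (r ∉ j :: m)) =
          ((rsN cs).filter (fun r => decide (r ∉ m))).erase j := by
        rw [hnd.erase_eq_filter, List.filter_filter]
        apply List.filter_congr
        intro a _
        by_cases h1 : a ∈ m <;> by_cases h2 : a = j <;> simp [h1, h2]
      rw [ih (j :: m) x, hFF]
      simp only [List.mem_cons]
      tauto

theorem greedy_nil (gs : List Nat) : greedy gs [] = [] := by
  induction gs with
  | nil => rfl
  | cons g gs ih => simp [greedy, ih]

theorem greedy_drop (r : Nat) (gs : List Nat) (h : ∀ g ∈ gs, r < g + 2) :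
    ∀ rs, greedy gs (r :: rs) = greedy gs rs := by
  induction gs with
  | nil => intro rs; rfl
  | cons g gs ih =>
    intro rs
    have h' : ∀ g' ∈ gs, r < g' + 2 := fun g' hg' => h g' (List.mem_cons_of_mem _ hg')
    have hgr : r < g + 2 := h g (List.mem_cons_self)
    simp only [greedy]
    rw [List.find?_cons_of_neg (p := fun x => decide (g + 2 ≤ x)) (by simp; omega)]
    cases hf : rs.find? (fun x => decide (g + 2 ≤ x)) with
    | none => exact ih h' rs
    | some j =>
      have hj : g + 2 ≤ j := by have := List.find?_some hf; simpa using this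
      show j :: greedy gs ((r :: rs).erase j) = j :: greedy gs (rs.erase j)
      rw [List.erase_cons_tail (by simp; omega), ih h' (rs.erase j)]

theorem tp_nil (gs : List Nat) : tp gs [] = [] := by cases gs <;> simp [tp]

theorem greedy_eq_tp (rs : List Nat) : ∀ gs, gs.Pairwise (· < ·) → greedy gs rs = tp gs rs := by
  induction rs with
  | nil => intro gs _; rw [greedy_nil, tp_nil]
  | cons r rs ih =>
    intro gs hp
    cases gs with
    | nil => simp [greedy, tp]
    | cons g gs' =>
      by_cases hgr : g + 2 ≤ r
      · simp only [greedy]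
        rw [List.find?_cons_of_pos (p := fun x => decide (g + 2 ≤ x)) (by simpa using hgr)]
        show r :: greedy gs' ((r :: rs).erase r) = tp (g :: gs') (r :: rs)
        rw [List.erase_cons_head]
        have htp : tp (g :: gs') (r :: rs) = if g + 2 ≤ r then r :: tp gs' rs else tp (g :: gs') rs := by
          simp [tp]
        rw [htp, if_pos hgr, ih gs' (List.pairwise_cons.1 hp).2]
      · have hall : ∀ g' ∈ g :: gs', r < g' + 2 := by
          intro g' hg'
          rcases List.mem_cons.1 hg' with h | h
          · omega
          · have := (List.pairwise_cons.1 hp).1 g' h; omega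
        rw [greedy_drop r (g :: gs') hall rs, ih (g :: gs') hp]
        have htp : tp (g :: gs') (r :: rs) = if g + 2 ≤ r then r :: tp gs' rs else tp (g :: gs') rs := by
          simp [tp]
        rw [htp, if_neg hgr]

theorem tp_nil_left (rs : List Nat) : tp [] rs = [] := by cases rs <;> simp [tp]

-- B's fold over rs computes tp
theorem foldB (rsn : List Nat) : ∀ (gsn : List Nat) (gi : Nat) (acc : List Int),
    ((rsn.map (fun n : Nat => (n : Int))).foldl (npBMatch (gsn.map (fun n : Nat => (n : Int)))) (acc, gi)).1 =
      acc ++ (tp (gsn.drop gi) rsn).map (fun n : Nat => (n : Int)) := by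
  induction rsn with
  | nil => intro gsn gi acc; simp [tp_nil]
  | cons r rsn ih =>
    intro gsn gi acc
    simp only [List.map_cons, List.foldl_cons]
    cases hd : gsn.drop gi with
    | nil =>
      have hlen : gsn.length ≤ gi := List.drop_eq_nil_iff.1 hd
      have hstep : npBMatch (gsn.map (fun n : Nat => (n : Int))) (acc, gi) (r : Int) = (acc, gi) := by
        unfold npBMatch
        rw [if_neg (fun hx => by simp only [List.length_map] at hx; omega)]
      rw [hstep, ih gsn gi acc, hd, tp_nil_left, tp_nil_left]
    | cons g rest =>
      have hgi : gi < gsn.length := by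
        have := congrArg List.length hd
        simp only [List.length_drop, List.length_cons] at this
        omega
      have hget : gsn[gi]? = some g := by
        have := congrArg (fun l => l[0]?) hd
        simpa [List.getElem?_drop] using this
      have hgetD : (gsn.map (fun n : Nat => (n : Int))).getD gi 0 = (g : Int) := by
        simp [List.getD_eq_getElem?_getD, hget]
      have hrest : gsn.drop (gi + 1) = rest := by
        have h1 : List.drop 1 (List.drop gi gsn) = rest := by rw [hd]; rfl
        rw [List.drop_drop] at h1
        exact h1
      have htp : tp (g :: rest) (r :: rsn) = if g + 2 ≤ r then r :: tp rest rsn else tp (g :: rest) rsn := by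
        simp [tp]
      by_cases hgr : g + 2 ≤ r
      · have hstep : npBMatch (gsn.map (fun n : Nat => (n : Int))) (acc, gi) (r : Int) =
            (acc ++ [(r : Int)], gi + 1) := by
          unfold npBMatch
          rw [if_pos ⟨by simpa using hgi, by rw [hgetD]; exact_mod_cast hgr⟩]
        rw [hstep, ih gsn (gi + 1) (acc ++ [(r : Int)]), hrest, htp, if_pos hgr]
        simp [List.append_assoc]
      · have hstep : npBMatch (gsn.map (fun n : Nat => (n : Int))) (acc, gi) (r : Int) = (acc, gi) := by
          unfold npBMatch
          rw [if_neg (fun hx => hgr (by have := hx.2; rw [hgetD] at this; exact_mod_cast this))]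
        rw [hstep, ih gsn gi acc, hd, htp, if_neg hgr]

-- the enumerate-comprehensions of Source B extract exactly gsN / rsN (as Int lists)
theorem filter_map_comm (l : List Nat) (q : Nat → Prop) [DecidablePred q] :
    l.filterMap (fun k => if q k then some ((k : Int)) else none) =
      (l.filter (fun k => decide (q k))).map (fun n : Nat => (n : Int)) := by
  induction l with
  | nil => rfl
  | cons a l ih => by_cases h : q a <;> simp [h, ih]

theorem enum_filterMap (cs : List Char) (c : Char) :
    (PySem.List.enumerate cs).filterMap (fun p => if p.2 = c then some p.1 else none) =
      ((List.range cs.length).filter (fun j => decide (cs.getD j ' ' = c))).map (fun n : Nat => (n : Int)) := by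
  rw [PySem.List.enumerate_eq_map_pyRange cs ' ', PySem.List.pyRange_one, List.map_map,
    List.filterMap_map]
  rw [show ((PySem.List.len cs) - 0).toNat = cs.length from by simp [PySem.List.len]]
  rw [← filter_map_comm (List.range cs.length) (fun j => cs.getD j ' ' = c)]
  apply List.filterMap_congr
  intro k _
  simp [PySem.List.pyGetD_natCast]

theorem enum_map_pieces (cs : List Char) (mN : List Nat) :
    (PySem.List.enumerate cs).map (fun p =>
        if p.1 ∈ (mN.map (fun n : Nat => (n : Int))) then [',', ' ', '1', '0', ')'] else [p.2]) =
      pieces cs mN := by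
  rw [PySem.List.enumerate_eq_map_pyRange cs ' ', PySem.List.pyRange_one, List.map_map,
    List.map_map]
  rw [show ((PySem.List.len cs) - 0).toNat = cs.length from by simp [PySem.List.len]]
  unfold pieces
  apply List.map_congr_left
  intro k _
  have hmem : (((0 : Int) + (k : Int)) ∈ mN.map (fun n : Nat => (n : Int))) ↔ k ∈ mN := by simp
  simp only [Function.comp_apply]
  by_cases hk : k ∈ mN
  · rw [if_pos (hmem.2 hk), if_pos hk]
  · rw [if_neg (fun hx => hk (hmem.1 hx)), if_neg hk]
    simp [PySem.List.pyGetD_natCast]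

theorem gsuffix_zero (cs : List Char) : gsuffix cs 0 = gsN cs := by
  simp [gsuffix, gsN, ← List.range_eq_range']

-- the core equality of the two 'log' transformations
theorem core (cs : List Char) :
    npAOuter (cs.map (fun c => [c])) 0 cs.length =
      (PySem.List.enumerate cs).map (fun p =>
        if p.1 ∈ (((PySem.List.enumerate cs).filterMap (fun p => if p.2 = ')' then some p.1 else none)).foldl
            (npBMatch ((PySem.List.enumerate cs).filterMap (fun p => if p.2 = 'g' then some p.1 else none)))
            ([], 0)).1 then [',', ' ', '1', '0', ')'] else [p.2]) := by
  rw [enum_filterMap cs ')', enum_filterMap cs 'g']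
  rw [show ((List.range cs.length).filter (fun j => decide (cs.getD j ' ' = ')'))) = rsN cs from rfl,
      show ((List.range cs.length).filter (fun j => decide (cs.getD j ' ' = 'g'))) = gsN cs from rfl]
  have hm := foldB (rsN cs) (gsN cs) 0 []
  simp only [List.drop_zero, List.nil_append] at hm
  rw [hm, enum_map_pieces cs (tp (gsN cs) (rsN cs)), ← pieces_nil cs]
  rw [outerA cs cs.length 0 [] rfl (by intro x hx; exact absurd hx (List.not_mem_nil))]
  rw [gsuffix_zero]
  apply pieces_congr
  intro x
  rw [seqF_mem cs (gsN cs) [] x]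
  rw [show (rsN cs).filter (fun r => decide (r ∉ ([] : List Nat))) = rsN cs from by simp]
  rw [greedy_eq_tp (rsN cs) (gsN cs) (gsN_pairwise cs)]
  simp

-- ===== VERDICT (by name: the statement is the Claim_ definition above) =====
theorem numpyParser_spec : Claim_equal_numpyParser := by
  unfold Claim_equal_numpyParser
  intro expre _
  unfold Spec_numpyParser
  simp only [numpyParser, numpyParser_alt, List.length_map]
  rw [core expre.toList]
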